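-- pv_equiv track=rewrite | github.com/andrewsun25/Matchery | matchery_server/python/match.py | parseStringToPreferences
-- ===== SOURCE A (Python) =====
-- def parseStringToPreferences(string, numAgents):
--     # len preferencesList == 12, numAgents = 3, numPreferencesPerAgent = 4. start = 0, start + numPreferencesPerAgent = 4.
--     preferencesList = [int(c) for c in string.split(',')]
--     numPreferencesPerAgent = int(len(preferencesList) / numAgents)
--     preferences = []
--     for i in range(0, numAgents):
--         start = i * numPreferencesPerAgent
--         preferences.append(preferencesList[start:start + numPreferencesPerAgent])
--     return preferences
-- ===== SOURCE B (Python) =====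
-- def parseStringToPreferences(string, numAgents):
--     vals = [int(c) for c in string.split(',')]
--     if numAgents <= 0:
--         return []
--     k = len(vals) // numAgents
--     return _chunks(vals, k, numAgents)
--
-- def _chunks(rest, k, n):
--     # recursive chunking: peel the first k values off, recurse on the remainder
--     if n == 0:
--         return []
--     return [rest[:k]] + _chunks(rest[k:], k, n - 1)
-- ===== Notes on version B (the rewrite author's own statement) =====
-- stated objective: alternative
-- what changed: Replaces the index-offset loop that slices preferencesList[i*k:(i+1)*k] for each agent by a recursive chunker that peels the first k parsed values off and recurses on the remaining suffix; the division and leftover-dropping behaviour are unchanged.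
import Mathlib
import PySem

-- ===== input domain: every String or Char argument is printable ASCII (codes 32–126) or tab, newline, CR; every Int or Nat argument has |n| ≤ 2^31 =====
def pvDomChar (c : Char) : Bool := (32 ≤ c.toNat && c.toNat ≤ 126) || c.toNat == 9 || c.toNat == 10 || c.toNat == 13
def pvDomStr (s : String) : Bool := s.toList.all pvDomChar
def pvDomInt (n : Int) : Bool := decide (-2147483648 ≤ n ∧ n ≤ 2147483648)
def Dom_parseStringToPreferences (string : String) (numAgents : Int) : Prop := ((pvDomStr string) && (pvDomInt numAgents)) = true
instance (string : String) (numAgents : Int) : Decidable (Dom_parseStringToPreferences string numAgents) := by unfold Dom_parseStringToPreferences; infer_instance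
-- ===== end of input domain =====

-- B replaces A's index-offset slicing loop by a recursive chunker over the suffix; alternative decomposition, same cost.


-- ===== PORT A =====
def parseStringToPreferences (string : String) (numAgents : Int) : List (List Int) :=
  let preferencesList := ((PySem.Str.split? string ",").getD []).map (fun c => (PySem.Int.ofStr? c).getD 0)
  -- int(len(...) / numAgents): ported by hand as Int.tdiv (truncation toward zero); exact wherever the
  -- float quotient truncates like the rational one. Pre_ excludes numAgents = 0 (ZeroDivisionError).
  let numPreferencesPerAgent := Int.tdiv (preferencesList.length : Int) numAgents
  (PySem.List.pyRange 0 numAgents 1).foldl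
    (fun preferences i =>
      preferences ++ [PySem.List.slice preferencesList (some (i * numPreferencesPerAgent)) (some (i * numPreferencesPerAgent + numPreferencesPerAgent))])
    []

-- ===== PORT B =====
def altChunks (k : Int) (rest : List Int) (n : Nat) : List (List Int) :=
  match n with
  | 0 => []
  | Nat.succ m => PySem.List.slice rest none (some k) :: altChunks k (PySem.List.slice rest (some k) none) m

def parseStringToPreferences_alt (string : String) (numAgents : Int) : List (List Int) :=
  let vals := ((PySem.Str.split? string ",").getD []).map (fun c => (PySem.Int.ofStr? c).getD 0)
  if numAgents ≤ 0 then []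
  else
    let k := PySem.Int.floordiv (vals.length : Int) numAgents
    altChunks k vals numAgents.toNat

-- ===== PRECONDITION & SPEC =====
-- Pre_ excludes exactly the inputs where the Python A raises: numAgents = 0 (ZeroDivisionError)
-- and comma-separated pieces that int() rejects (ValueError), e.g. '' or 'x'.
def Pre_parseStringToPreferences (string : String) (numAgents : Int) : Prop :=
  numAgents ≠ 0 ∧ ∀ c ∈ (PySem.Str.split? string ",").getD [], (PySem.Int.ofStr? c).isSome
instance (string : String) (numAgents : Int) : Decidable (Pre_parseStringToPreferences string numAgents) := by unfold Pre_parseStringToPreferences; infer_instance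
def pvWitness_parseStringToPreferences : String × Int := ("1,2,3,4", 2)
def Spec_parseStringToPreferences (string : String) (numAgents : Int) (out : List (List Int)) : Prop := out = parseStringToPreferences_alt string numAgents
instance (string : String) (numAgents : Int) (out : List (List Int)) : Decidable (Spec_parseStringToPreferences string numAgents out) := by unfold Spec_parseStringToPreferences; infer_instance

-- ===== CLAIM (what is proved, stated in full; the proofs are below) =====
def Claim_equal_parseStringToPreferences : Prop := ∀ (string : String) (numAgents : Int), Dom_parseStringToPreferences string numAgents → Pre_parseStringToPreferences string numAgents → Spec_parseStringToPreferences string numAgents (parseStringToPreferences string numAgents)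

-- ===== LEMMAS AND PROOFS =====

theorem foldl_append_singleton {α β : Type} (f : α → β) :
    ∀ (l : List α) (init : List β), l.foldl (fun acc i => acc ++ [f i]) init = init ++ l.map f := by
  intro l
  induction l with
  | nil => intro init; simp
  | cons x xs ih => intro init; simp [List.foldl, ih]

theorem altChunks_eq_map (k' : Nat) :
    ∀ (n : Nat) (L : List Int),
      altChunks (k' : Int) L n = (List.range n).map (fun j => (L.drop (j * k')).take k') := by
  intro n
  induction n with
  | zero => intro L; simp [altChunks]
  | succ m ih =>
    intro L
    rw [List.range_succ_eq_map]
    simp only [altChunks, PySem.List.slice_to_natCast, PySem.List.slice_from_natCast, ih,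
      List.map_cons, List.map_map]
    congr 1
    · simp
    · apply List.map_congr_left
      intro j _
      simp [Function.comp, List.drop_drop, Nat.succ_mul, Nat.add_comm]

-- ===== VERDICT (by name: the statement is the Claim_ definition above) =====
theorem parseStringToPreferences_spec : Claim_equal_parseStringToPreferences := by
  intro string numAgents _ hpre
  unfold Spec_parseStringToPreferences parseStringToPreferences parseStringToPreferences_alt
  set L := ((PySem.Str.split? string ",").getD []).map (fun c => (PySem.Int.ofStr? c).getD 0) with hL
  rcases lt_trichotomy numAgents 0 with hn | hn | hn
  · -- negative: A's range is empty, B returns []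
    rw [PySem.List.pyRange_one_eq_nil (by omega)]
    simp [hn.le, List.foldl]
  · exact absurd hn hpre.1
  · -- positive agents
    have hnle : ¬ numAgents ≤ 0 := by omega
    simp only [hnle, if_false]
    have hk : Int.tdiv (L.length : Int) numAgents = PySem.Int.floordiv (L.length : Int) numAgents := by
      rw [PySem.Int.floordiv_eq_ediv_of_pos hn, Int.tdiv_eq_ediv_of_nonneg (by positivity)]
    rw [hk]
    have hk0 : 0 ≤ PySem.Int.floordiv (L.length : Int) numAgents := by
      rw [PySem.Int.floordiv_eq_ediv_of_pos hn]
      exact Int.ediv_nonneg (by positivity) hn.le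
    generalize hg : PySem.Int.floordiv (L.length : Int) numAgents = k at hk0 ⊢
    obtain ⟨k', rfl⟩ : ∃ k' : Nat, k = (k' : Int) := ⟨k.toNat, (Int.toNat_of_nonneg hk0).symm⟩
    rw [foldl_append_singleton, List.nil_append, PySem.List.pyRange_one, altChunks_eq_map]
    have hn' : (numAgents - 0).toNat = numAgents.toNat := by omega
    rw [hn', List.map_map]
    apply List.map_congr_left
    intro j _
    have : ((0 : Int) + j) * (k' : Int) = ((j * k' : Nat) : Int) := by push_cast; ring
    simp only [Function.comp, this]
    have h2 : ((j * k' : Nat) : Int) + (k' : Int) = ((j * k' + k' : Nat) : Int) := by push_cast; ring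
    rw [h2, PySem.List.slice_natCast]
    congr 1
    omega
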